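-- pv_equiv track=rewrite | github.com/Oluwatobiloba-ojo/python | chibuzor_snacks/student_grade_function.py | check_for_the_lowest
-- ===== SOURCE A (Python) =====
-- def check_for_the_lowest(grades, numberOfSubject):
--     student = 1
--     subject = 1
--     minimum = grades[0][0]
--     for value in range(numberOfSubject):
--         for idx, score in enumerate(grades):
--             if grades[idx][value] < minimum:
--                 minimum = grades[idx][value]
--                 student = idx + 1
--                 subject = value + 1
--     return [subject, student, minimum]
-- ===== SOURCE B (Python) =====
-- def check_for_the_lowest(grades, numberOfSubject):
--     # Pass 1: one candidate (column_min, earliest_row) per subject column.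
--     candidates = []
--     for value in range(numberOfSubject):
--         col_min = grades[0][value]
--         col_row = 0
--         for idx in range(1, len(grades)):
--             if grades[idx][value] < col_min:
--                 col_min = grades[idx][value]
--                 col_row = idx
--         candidates.append((value, col_row, col_min))
--     # Pass 2: pick the subject with the smallest column minimum (strict update,
--     # default cell is grades[0][0] with subject 1, student 1).
--     subject, student, minimum = 1, 1, grades[0][0]
--     for value, row, m in candidates:
--         if m < minimum:
--             subject, student, minimum = value + 1, row + 1, m
--     return [subject, student, minimum]
-- ===== Notes on version B (the rewrite author's own statement) =====
-- stated objective: alternative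
-- what changed: A threads one global (student,subject,minimum) state through a column-by-row double loop; B first computes, per subject column, its minimum and earliest achieving row as a candidate list, then selects the winning column in a separate second pass.
import Mathlib
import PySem

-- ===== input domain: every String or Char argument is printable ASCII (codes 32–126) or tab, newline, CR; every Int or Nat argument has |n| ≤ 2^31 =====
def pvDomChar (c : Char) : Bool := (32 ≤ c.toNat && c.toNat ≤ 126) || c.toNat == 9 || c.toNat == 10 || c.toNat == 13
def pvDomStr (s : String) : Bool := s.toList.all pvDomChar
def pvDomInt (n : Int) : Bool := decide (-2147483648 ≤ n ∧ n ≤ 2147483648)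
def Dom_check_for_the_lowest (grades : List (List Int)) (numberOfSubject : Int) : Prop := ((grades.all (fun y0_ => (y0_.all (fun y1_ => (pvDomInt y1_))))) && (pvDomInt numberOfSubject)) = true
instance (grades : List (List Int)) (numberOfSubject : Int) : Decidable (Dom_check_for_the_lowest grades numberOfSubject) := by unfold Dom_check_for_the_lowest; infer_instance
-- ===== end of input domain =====

-- B replaces A's single global-state double loop by a per-column candidate pass plus a
-- separate selection pass (same cost, different decomposition); return values proved equal on Pre_.


-- ===== PORT A =====
def check_for_the_lowest (grades : List (List Int)) (numberOfSubject : Int) : List Int :=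
  -- state (student, subject, minimum); pyGetD is exact under Pre_ (all indexing in range)
  let s0 : Int × Int × Int := (1, 1, PySem.List.pyGetD (PySem.List.pyGetD grades 0 []) 0 0)
  let s := (PySem.List.pyRange 0 numberOfSubject 1).foldl (fun s value =>
      (PySem.List.enumerate grades 0).foldl (fun (s : Int × Int × Int) p =>
        if PySem.List.pyGetD (PySem.List.pyGetD grades p.1 []) value 0 < s.2.2 then
          (p.1 + 1, value + 1, PySem.List.pyGetD (PySem.List.pyGetD grades p.1 []) value 0)
        else s) s) s0
  [s.2.1, s.1, s.2.2]

-- ===== PORT B =====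
def check_for_the_lowest_alt (grades : List (List Int)) (numberOfSubject : Int) : List Int :=
  -- pass 1: per column, the candidate (value, earliest_row, column_min)
  let candidates := (PySem.List.pyRange 0 numberOfSubject 1).map (fun value =>
    let p := (PySem.List.pyRange 1 (grades.length : Int) 1).foldl
      (fun (p : Int × Int) idx =>
        if PySem.List.pyGetD (PySem.List.pyGetD grades idx []) value 0 < p.1 then
          (PySem.List.pyGetD (PySem.List.pyGetD grades idx []) value 0, idx)
        else p) (PySem.List.pyGetD (PySem.List.pyGetD grades 0 []) value 0, 0)
    (value, p.2, p.1))
  -- pass 2: select the winning column; state (subject, student, minimum)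
  let s := candidates.foldl (fun (s : Int × Int × Int) c =>
      if c.2.2 < s.2.2 then (c.1 + 1, c.2.1 + 1, c.2.2) else s)
    (1, 1, PySem.List.pyGetD (PySem.List.pyGetD grades 0 []) 0 0)
  [s.1, s.2.1, s.2.2]

-- ===== PRECONDITION & SPEC =====
-- Pre_: exactly where Python A returns (no IndexError): a first row with a first cell,
-- and every row long enough for every scanned column.
def Pre_check_for_the_lowest (grades : List (List Int)) (numberOfSubject : Int) : Prop :=
  grades ≠ [] ∧ grades.headD [] ≠ [] ∧ ∀ row ∈ grades, numberOfSubject ≤ (row.length : Int)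
instance (grades : List (List Int)) (numberOfSubject : Int) : Decidable (Pre_check_for_the_lowest grades numberOfSubject) := by unfold Pre_check_for_the_lowest; infer_instance

def pvWitness_check_for_the_lowest : List (List Int) × Int := ([[5, 3], [2, 8]], 2)

def Spec_check_for_the_lowest (grades : List (List Int)) (numberOfSubject : Int) (out : List Int) : Prop := out = check_for_the_lowest_alt grades numberOfSubject
instance (grades : List (List Int)) (numberOfSubject : Int) (out : List Int) : Decidable (Spec_check_for_the_lowest grades numberOfSubject out) := by unfold Spec_check_for_the_lowest; infer_instance

-- ===== CLAIM (what is proved, stated in full; the proofs are below) =====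
def Claim_equal_check_for_the_lowest : Prop := ∀ (grades : List (List Int)) (numberOfSubject : Int), Dom_check_for_the_lowest grades numberOfSubject → Pre_check_for_the_lowest grades numberOfSubject → Spec_check_for_the_lowest grades numberOfSubject (check_for_the_lowest grades numberOfSubject)

-- ===== LEMMAS AND PROOFS =====

-- the cell grades[j][value] as the ports read it
def pvG (grades : List (List Int)) (value j : Int) : Int :=
  PySem.List.pyGetD (PySem.List.pyGetD grades j []) value 0

-- B's column scan: (column minimum, earliest row achieving it)
def pvColMin (grades : List (List Int)) (value : Int) : Int × Int :=
  (PySem.List.pyRange 1 (grades.length : Int) 1).foldl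
    (fun (p : Int × Int) idx =>
      if pvG grades value idx < p.1 then (pvG grades value idx, idx) else p)
    (pvG grades value 0, 0)

-- Strict-min fold correspondence: A's inner row loop starting from a state whose
-- minimum component is s.2.2, compared with a plain (min, row) column scan.
theorem pv_colM (g : Int → Int) (v : Int) :
    ∀ (is : List Int) (c r : Int) (s : Int × Int × Int),
      is.foldl (fun s i => if g i < s.2.2 then (i + 1, v + 1, g i) else s)
        (if c < s.2.2 then (r + 1, v + 1, c) else s)
      = (let p := is.foldl (fun p i => if g i < p.1 then (g i, i) else p) (c, r)
         if p.1 < s.2.2 then (p.2 + 1, v + 1, p.1) else s) := by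
  intro is
  induction is with
  | nil => intro c r s; simp
  | cons i is ih =>
    intro c r s
    simp only [List.foldl_cons]
    by_cases h1 : g i < c
    · have hB : (if g i < c then (g i, i) else (c, r)) = (g i, i) := by simp [h1]
      rw [hB]
      have hstep : (if g i < (if c < s.2.2 then (r + 1, v + 1, c) else s).2.2
            then (i + 1, v + 1, g i)
            else if c < s.2.2 then (r + 1, v + 1, c) else s)
          = (if g i < s.2.2 then (i + 1, v + 1, g i) else s) := by
        by_cases h3 : c < s.2.2
        · have h4 : g i < s.2.2 := by omega
          simp [h3, h1, h4]
        · simp [h3]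
      rw [hstep, ih (g i) i s]
    · have hB : (if g i < c then (g i, i) else (c, r)) = (c, r) := by simp [h1]
      rw [hB]
      have hstep : (if g i < (if c < s.2.2 then (r + 1, v + 1, c) else s).2.2
            then (i + 1, v + 1, g i)
            else if c < s.2.2 then (r + 1, v + 1, c) else s)
          = (if c < s.2.2 then (r + 1, v + 1, c) else s) := by
        by_cases h3 : c < s.2.2
        · have h4 : ¬ g i < c := h1
          simp [h3, h4]
        · have h4 : ¬ g i < s.2.2 := by omega
          simp [h3, h4]
      rw [hstep, ih c r s]

-- fold transport along the component swap (student,subject,min) ↦ (subject,student,min)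
theorem pv_foldl_swap {γ : Type} (sw : Int × Int × Int → Int × Int × Int)
    (fA fB : Int × Int × Int → γ → Int × Int × Int)
    (h : ∀ s x, fB (sw s) x = sw (fA s x)) :
    ∀ (l : List γ) (s : Int × Int × Int), l.foldl fB (sw s) = sw (l.foldl fA s) := by
  intro l
  induction l with
  | nil => intro s; rfl
  | cons x xs ih => intro s; rw [List.foldl_cons, List.foldl_cons, h s x]; exact ih _

theorem check_for_the_lowest_spec : Claim_equal_check_for_the_lowest := by
  intro grades numberOfSubject _hDom hPre
  unfold Spec_check_for_the_lowest
  obtain ⟨hne, -, -⟩ := hPre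
  have hlen : (0 : Int) < (grades.length : Int) := by
    cases grades with
    | nil => exact absurd rfl hne
    | cons a l => simp
  have hEnum : PySem.List.enumerate grades 0
      = (PySem.List.pyRange 0 (grades.length : Int) 1).map
          (fun j => (j, PySem.List.pyGetD grades j [])) :=
    PySem.List.enumerate_eq_map_pyRange grades []
  -- A's per-column body equals selecting from B's column candidate (state order of A)
  have hcol : ∀ (value : Int) (s : Int × Int × Int),
      (PySem.List.enumerate grades 0).foldl (fun (s : Int × Int × Int) p =>
        if pvG grades value p.1 < s.2.2 then (p.1 + 1, value + 1, pvG grades value p.1) else s) s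
      = (if (pvColMin grades value).1 < s.2.2
          then ((pvColMin grades value).2 + 1, value + 1, (pvColMin grades value).1) else s) := by
    intro value s
    rw [hEnum, List.foldl_map, PySem.List.pyRange_one_cons hlen]
    simp only [List.foldl_cons]
    have hM := pv_colM (fun j => pvG grades value j) value
      (PySem.List.pyRange (0 + 1) (grades.length : Int) 1) (pvG grades value 0) 0 s
    simp only [zero_add] at hM
    exact hM
  have hbodyA : (fun (s : Int × Int × Int) value =>
      (PySem.List.enumerate grades 0).foldl (fun (s : Int × Int × Int) p =>
        if pvG grades value p.1 < s.2.2 then (p.1 + 1, value + 1, pvG grades value p.1) else s) s)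
      = (fun (s : Int × Int × Int) value =>
          if (pvColMin grades value).1 < s.2.2
            then ((pvColMin grades value).2 + 1, value + 1, (pvColMin grades value).1) else s) := by
    funext s value
    exact hcol value s
  have hgoal :
      (let s := (PySem.List.pyRange 0 numberOfSubject 1).foldl (fun (s : Int × Int × Int) value =>
          if (pvColMin grades value).1 < s.2.2
            then ((pvColMin grades value).2 + 1, value + 1, (pvColMin grades value).1) else s)
          (1, 1, pvG grades 0 0)
       [s.2.1, s.1, s.2.2])
      = (let t := (PySem.List.pyRange 0 numberOfSubject 1).foldl (fun (t : Int × Int × Int) value =>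
          if (pvColMin grades value).1 < t.2.2
            then (value + 1, (pvColMin grades value).2 + 1, (pvColMin grades value).1) else t)
          (1, 1, pvG grades 0 0)
         [t.1, t.2.1, t.2.2]) := by
    have hsw := pv_foldl_swap (fun s => (s.2.1, s.1, s.2.2))
      (fun (s : Int × Int × Int) value =>
        if (pvColMin grades value).1 < s.2.2
          then ((pvColMin grades value).2 + 1, value + 1, (pvColMin grades value).1) else s)
      (fun (t : Int × Int × Int) value =>
        if (pvColMin grades value).1 < t.2.2
          then (value + 1, (pvColMin grades value).2 + 1, (pvColMin grades value).1) else t)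
      (by intro s x; by_cases h : (pvColMin grades x).1 < s.2.2 <;> simp [h])
      (PySem.List.pyRange 0 numberOfSubject 1)
      (1, 1, pvG grades 0 0)
    simp only [hsw]
  calc check_for_the_lowest grades numberOfSubject
      = (let s := (PySem.List.pyRange 0 numberOfSubject 1).foldl (fun (s : Int × Int × Int) value =>
          (PySem.List.enumerate grades 0).foldl (fun (s : Int × Int × Int) p =>
            if pvG grades value p.1 < s.2.2 then (p.1 + 1, value + 1, pvG grades value p.1) else s) s)
          (1, 1, pvG grades 0 0)
         [s.2.1, s.1, s.2.2]) := rfl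
    _ = (let s := (PySem.List.pyRange 0 numberOfSubject 1).foldl (fun (s : Int × Int × Int) value =>
          if (pvColMin grades value).1 < s.2.2
            then ((pvColMin grades value).2 + 1, value + 1, (pvColMin grades value).1) else s)
          (1, 1, pvG grades 0 0)
         [s.2.1, s.1, s.2.2]) := by rw [hbodyA]
    _ = (let t := (PySem.List.pyRange 0 numberOfSubject 1).foldl (fun (t : Int × Int × Int) value =>
          if (pvColMin grades value).1 < t.2.2
            then (value + 1, (pvColMin grades value).2 + 1, (pvColMin grades value).1) else t)
          (1, 1, pvG grades 0 0)
         [t.1, t.2.1, t.2.2]) := hgoal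
    _ = check_for_the_lowest_alt grades numberOfSubject := by
          simp only [check_for_the_lowest_alt, List.foldl_map]
          rfl
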